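-- pv_equiv track=rewrite | github.com/meexwaal/IA32-FPGA | analysis/asmparse.py | little_endian
-- ===== SOURCE A (Python) =====
-- def little_endian(bs):
--     acc = 0
--     for i in range(len(bs)):
--         acc += (256 ** i) * bs[i]
--
--     # TODO negative
--     hi_limit = 256**len(bs)
--     intmax = hi_limit // 2 - 1
--     if acc > intmax:
--         acc -= hi_limit
--
--     return hex(acc)
-- ===== SOURCE B (Python) =====
-- def little_endian(bs):
--     def value(chunk):
--         # little-endian value of chunk, by balanced divide and conquer
--         if len(chunk) <= 1:
--             return chunk[0] if chunk else 0
--         mid = len(chunk) // 2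
--         return value(chunk[:mid]) + 256 ** mid * value(chunk[mid:])
--
--     acc = value(bs)
--     hi_limit = 2 ** (8 * len(bs))
--     if acc >= hi_limit // 2:
--         acc -= hi_limit
--     return hex(acc)
-- ===== Notes on version B (the rewrite author's own statement) =====
-- stated objective: faster
-- what changed: Replaces the indexed loop summing freshly computed powers 256**i with a balanced divide-and-conquer evaluation (value(left) + 256**mid * value(right)), computes the modulus as 2**(8*len(bs)) and tests the sign with acc >= hi_limit//2 instead of acc > hi_limit//2 - 1.
import Mathlib
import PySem

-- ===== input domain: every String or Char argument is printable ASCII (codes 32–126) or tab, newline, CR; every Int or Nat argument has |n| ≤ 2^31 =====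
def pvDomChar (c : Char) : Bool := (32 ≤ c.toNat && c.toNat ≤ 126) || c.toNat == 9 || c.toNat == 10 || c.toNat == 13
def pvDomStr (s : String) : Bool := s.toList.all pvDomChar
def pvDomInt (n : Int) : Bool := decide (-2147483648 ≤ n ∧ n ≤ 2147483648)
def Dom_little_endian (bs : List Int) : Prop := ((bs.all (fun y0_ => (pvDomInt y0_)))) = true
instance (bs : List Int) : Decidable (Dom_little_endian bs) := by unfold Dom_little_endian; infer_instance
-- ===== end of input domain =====

-- B computes the value by balanced divide and conquer instead of an indexed power sum, and phrases the signed wrap as acc >= hi_limit//2; same return value.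

-- shared helper: Python's built-in hex(n) ("0x…"/"-0x…", lowercase), used by both ports
def pyHexDigit (d : Nat) : Char := if d < 10 then Char.ofNat (48 + d) else Char.ofNat (87 + d)

def pyHexAux (n : Nat) (acc : List Char) : List Char :=
  if h : n = 0 then acc else pyHexAux (n / 16) (pyHexDigit (n % 16) :: acc)
decreasing_by exact Nat.div_lt_self (Nat.pos_of_ne_zero h) (by norm_num)

def pyHex (n : Int) : String :=
  if n < 0 then "-0x" ++ String.ofList (pyHexAux n.natAbs []) else
  if n = 0 then "0x0" else "0x" ++ String.ofList (pyHexAux n.toNat [])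

-- ===== PORT A =====
def little_endian (bs : List Int) : String :=
  let acc : Int :=
    (PySem.List.pyRange 0 (PySem.List.len bs) 1).foldl
      (fun acc i => acc + (256 : Int) ^ i.toNat * PySem.List.pyGetD bs i 0) 0
  let hi_limit : Int := (256 : Int) ^ bs.length
  let intmax : Int := PySem.Int.floordiv hi_limit 2 - 1
  let acc := if acc > intmax then acc - hi_limit else acc
  pyHex acc

-- ===== PORT B =====
-- balanced divide-and-conquer little-endian value of a chunk (helper of Source B's little_endian)
def pvValue (chunk : List Int) : Int :=
  if chunk.length ≤ 1 then chunk.headD 0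
  else
    let mid := chunk.length / 2
    pvValue (chunk.take mid) + (256 : Int) ^ mid * pvValue (chunk.drop mid)
termination_by chunk.length
decreasing_by
  · simp only [List.length_take]; omega
  · simp only [List.length_drop]; omega

def little_endian_alt (bs : List Int) : String :=
  let acc : Int := pvValue bs
  let hi_limit : Int := (2 : Int) ^ (8 * bs.length)
  let acc := if acc ≥ PySem.Int.floordiv hi_limit 2 then acc - hi_limit else acc
  pyHex acc

-- ===== PRECONDITION & SPEC =====
def Spec_little_endian (bs : List Int) (out : String) : Prop := out = little_endian_alt bs
instance (bs : List Int) (out : String) : Decidable (Spec_little_endian bs out) := by unfold Spec_little_endian; infer_instance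

-- ===== CLAIM (what is proved, stated in full; the proofs are below) =====
def Claim_equal_little_endian : Prop := ∀ (bs : List Int), Dom_little_endian bs → Spec_little_endian bs (little_endian bs)

-- ===== LEMMAS AND PROOFS =====

-- proof-only helper: plain structural Horner recursion, the common meaning of both accumulators
def pvHorner : List Int → Int
  | [] => 0
  | b :: rest => b + 256 * pvHorner rest

theorem pvHorner_append_singleton (t : List Int) (b : Int) :
    pvHorner (t ++ [b]) = pvHorner t + (256 : Int) ^ t.length * b := by
  induction t with
  | nil => simp [pvHorner]
  | cons x xs ih => simp [pvHorner, ih, pow_succ]; ring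

theorem accA_eq_pvHorner (bs : List Int) :
    (PySem.List.pyRange 0 (PySem.List.len bs) 1).foldl
      (fun acc i => acc + (256 : Int) ^ i.toNat * PySem.List.pyGetD bs i 0) 0 = pvHorner bs := by
  induction bs using List.reverseRecOn with
  | nil => simp [PySem.List.pyRange_one_eq_nil, pvHorner]
  | append_singleton t b ih =>
    have hlen : (PySem.List.len (t ++ [b]) : Int) = (t.length : Int) + 1 := by
      simp [PySem.List.len]
    rw [hlen, PySem.List.pyRange_one_succ_right (by positivity), List.foldl_append]
    have hcongr :
        (PySem.List.pyRange 0 (t.length : Int) 1).foldl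
          (fun acc i => acc + (256 : Int) ^ i.toNat * PySem.List.pyGetD (t ++ [b]) i 0) 0 =
        (PySem.List.pyRange 0 (t.length : Int) 1).foldl
          (fun acc i => acc + (256 : Int) ^ i.toNat * PySem.List.pyGetD t i 0) 0 := by
      apply PySem.List.foldl_congr_mem
      intro acc i hi
      obtain ⟨h0, h1⟩ := PySem.List.mem_pyRange_one.mp hi
      have hnat : i.toNat < t.length := by omega
      have hi' : i = ((i.toNat : Nat) : Int) := by omega
      rw [hi', PySem.List.pyGetD_natCast, PySem.List.pyGetD_natCast]
      simp [List.getD_eq_getElem?_getD, List.getElem?_append_left hnat]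
    have hlast : PySem.List.pyGetD (t ++ [b]) (t.length : Int) 0 = b := by
      rw [PySem.List.pyGetD_natCast]
      simp [List.getD_eq_getElem?_getD]
    simp only [PySem.List.len_eq] at ih
    simp only [List.foldl_cons, List.foldl_nil, hcongr, hlast, Int.toNat_natCast]
    rw [ih, pvHorner_append_singleton]


theorem pvHorner_append (l r : List Int) :
    pvHorner (l ++ r) = pvHorner l + (256 : Int) ^ l.length * pvHorner r := by
  induction l with
  | nil => simp [pvHorner]
  | cons x xs ih => simp [pvHorner, ih, pow_succ]; ring

theorem pvValue_eq_pvHorner (bs : List Int) : pvValue bs = pvHorner bs := by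
  induction bs using pvValue.induct with
  | case1 chunk h =>
    match chunk, h with
    | [], _ => simp [pvValue, pvHorner]
    | [b], _ => simp [pvValue, pvHorner]
  | case2 chunk h mid ih1 ih2 =>
    rw [pvValue]
    simp only [if_neg h]
    have htake : (chunk.take mid).length = mid := by
      simp only [List.length_take]; omega
    rw [ih1, ih2]
    conv_rhs => rw [← List.take_append_drop mid chunk, pvHorner_append, htake]

theorem hi_eq (n : Nat) : (256 : Int) ^ n = (2 : Int) ^ (8 * n) := by
  rw [pow_mul]; norm_num

-- ===== VERDICT (by name: the statement is the Claim_ definition above) =====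
theorem little_endian_spec : Claim_equal_little_endian := by
  intro bs _
  unfold Spec_little_endian little_endian little_endian_alt
  rw [accA_eq_pvHorner, hi_eq, ← pvValue_eq_pvHorner]
  have hcond : (pvValue bs > PySem.Int.floordiv ((2:Int) ^ (8 * bs.length)) 2 - 1) =
      (pvValue bs ≥ PySem.Int.floordiv ((2:Int) ^ (8 * bs.length)) 2) := by
    simp only [gt_iff_lt, ge_iff_le, eq_iff_iff]
    omega
  simp only [hcond]
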